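-- pv_equiv track=rewrite | github.com/MinSeo-Ming/Algo_Solved | 프로그래머스/1/42840. 모의고사/모의고사.py | solution
-- ===== SOURCE A (Python) =====
-- def solution(answers):
--     # 사람으로 돌려가며 비교
--         # 문제랑 정답이랑 비교한다
--         # 문제 반복해서 찍으니
--         # 길이 만큼만 반복해서 한다.
--         #맞을 경우 +1
--     # 최고값과 비교하여 같으면 인덱스 추가
--     # 높으면 전체다 지우고 현재만 추가
--     # 낮으면 스킵
--     answer = []
--     people =[[1, 2, 3, 4, 5],[2, 1, 2, 3, 2, 4, 2, 5],[3, 3, 1, 1, 2, 2, 4, 4, 5, 5]]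
--     MAX=-1
--     order =0
--     for person in (people):
--         le=len(person)
--         sum=0
--         order +=1
--         for i in range(len(answers)):
--             idx = i%le
--             if person[idx] == answers[i]:
--                 sum+=1
--
--         if(MAX<sum):
--             MAX=sum
--             answer.clear()
--             answer.append(order)
--         elif(MAX==sum):
--             answer.append(order)
--     return answer
-- ===== SOURCE B (Python) =====
-- def solution(answers):
--     patterns = [[1, 2, 3, 4, 5],
--                 [2, 1, 2, 3, 2, 4, 2, 5],
--                 [3, 3, 1, 1, 2, 2, 4, 4, 5, 5]]
--     PERIOD = 40  # lcm of the three pattern lengths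
--     # invert the patterns once: for each position residue r < 40, a lookup
--     # table mapping an answer value to the people who answer that value at r
--     table = []
--     for r in range(PERIOD):
--         row = {}
--         for k, p in enumerate(patterns):
--             v = p[r % len(p)]
--             row[v] = row.get(v, []) + [k]
--         table.append(row)
--     scores = [0, 0, 0]
--     for i, a in enumerate(answers):
--         for k in table[i % PERIOD].get(a, []):
--             scores[k] += 1
--     best = max(scores)
--     return [k + 1 for k, s in enumerate(scores) if s == best]
-- ===== Notes on version B (the rewrite author's own statement) =====
-- stated objective: alternative
-- what changed: Replaces A's pattern-major nested scan (for each person, re-walk all answers with modular indexing under an online running max with clear()/append) by an inverted index: precompute, for each position residue mod 40 (the lcm of the pattern lengths), a dict mapping answer value to the people answering that value there, then a single answer-major pass increments the scores via dict lookup with no comparison against the patterns, followed by max() and an index comprehension.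
import Mathlib
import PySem

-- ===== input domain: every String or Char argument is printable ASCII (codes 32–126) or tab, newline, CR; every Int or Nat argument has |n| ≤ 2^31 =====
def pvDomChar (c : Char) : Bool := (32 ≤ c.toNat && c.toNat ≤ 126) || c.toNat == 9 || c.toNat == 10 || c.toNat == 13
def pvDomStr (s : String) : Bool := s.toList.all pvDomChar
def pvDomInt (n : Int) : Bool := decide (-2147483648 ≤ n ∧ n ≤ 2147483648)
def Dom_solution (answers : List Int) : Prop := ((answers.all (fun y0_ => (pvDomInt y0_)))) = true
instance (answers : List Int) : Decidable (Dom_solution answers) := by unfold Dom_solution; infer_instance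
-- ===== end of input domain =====

-- B replaces A's pattern-major nested scan with online max-tracking by an inverted index:
-- a 40-entry table (residue mod 40 ↦ dict: answer value ↦ people answering it there), one
-- answer-major pass incrementing scores via dict lookup, then max() and an index comprehension
-- (objective: alternative).

-- ===== PORT A =====
-- person[idx] and answers[i] are always indexed in range (idx = i % le < le, i < len answers),
-- so List.getD is exact for Python's subscript here; range(len(answers)) over Nat indices is
-- exactly List.range answers.length.
def solution (answers : List Int) : List Int :=
  let people : List (List Int) :=
    [[1, 2, 3, 4, 5], [2, 1, 2, 3, 2, 4, 2, 5], [3, 3, 1, 1, 2, 2, 4, 4, 5, 5]]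
  -- state = (answer, MAX, order)
  let st := people.foldl (fun (st : List Int × Int × Int) person =>
    let le := person.length
    let sum := (List.range answers.length).foldl (fun s i =>
      let idx := i % le
      if person.getD idx 0 == answers.getD i 0 then s + 1 else s) (0 : Int)
    let order := st.2.2 + 1
    if st.2.1 < sum then ([order], sum, order)
    else if st.2.1 == sum then (st.1 ++ [order], sum, order)
    else (st.1, st.2.1, order)) ([], -1, 0)
  st.1

-- ===== PORT B =====
-- table: for r in range(40): row = {}; for k, p in enumerate(patterns): v = p[r % len(p)];
-- row[v] = row.get(v, []) + [k]; table.append(row).  range(40) over literal nonnegative bounds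
-- is exactly List.range 40; p[r % len(p)] is in range, so getD is exact.
def pvTable : List (PySem.Dict Int (List Int)) :=
  let patterns : List (List Int) :=
    [[1, 2, 3, 4, 5], [2, 1, 2, 3, 2, 4, 2, 5], [3, 3, 1, 1, 2, 2, 4, 4, 5, 5]]
  (List.range 40).foldl (fun table r =>
    let row := (PySem.List.enumerate patterns).foldl
      (fun (row : PySem.Dict Int (List Int)) kp =>
        let v := kp.2.getD (r % kp.2.length) 0
        row.insert v (row.getD v [] ++ [kp.1])) PySem.Dict.empty
    table ++ [row]) []

def solution_alt (answers : List Int) : List Int :=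
  -- i from enumerate is ≥ 0 and i % 40 < 40 = len(table), so toNat % 40 and getD are exact;
  -- k from the table is always 0, 1 or 2, so scores[k] += 1 is exactly set/getD at k.toNat.
  let scores := (PySem.List.enumerate answers).foldl (fun st ia =>
    ((pvTable.getD (ia.1.toNat % 40) PySem.Dict.empty).getD ia.2 []).foldl
      (fun (s : List Int) k => s.set k.toNat (s.getD k.toNat 0 + 1)) st) [0, 0, 0]
  -- max(scores): scores always has three elements, so Python's max returns a value; getD 0 unreached
  let best := (PySem.List.max? scores (fun x => x)).getD 0
  (PySem.List.enumerate scores).filterMap (fun x => if x.2 == best then some (x.1 + 1) else none)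

-- ===== PRECONDITION & SPEC =====
def Spec_solution (answers : List Int) (out : List Int) : Prop := out = solution_alt answers
instance (answers : List Int) (out : List Int) : Decidable (Spec_solution answers out) := by unfold Spec_solution; infer_instance

-- ===== CLAIM (what is proved, stated in full; the proofs are below) =====
def Claim_equal_solution : Prop := ∀ (answers : List Int), Dom_solution answers → Spec_solution answers (solution answers)

-- ===== LEMMAS AND PROOFS =====

-- the common characterisation of a pattern's score
def pvCnt (answers p : List Int) : Int :=
  (((List.range answers.length).filter
      (fun i => p.getD (i % p.length) 0 == answers.getD i 0)).length : Int)

theorem pv_foldl_count (f : Nat → Bool) (l : List Nat) (init : Int) :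
    l.foldl (fun s i => if f i then s + 1 else s) init = init + ((l.filter f).length : Int) := by
  induction l generalizing init with
  | nil => simp
  | cons x t ih =>
    by_cases h : f x <;> simp [List.foldl, h, ih] <;> ring

theorem pv_scoreA_eq (answers p : List Int) :
    (List.range answers.length).foldl (fun s i =>
      let idx := i % p.length
      if p.getD idx 0 == answers.getD i 0 then s + 1 else s) (0 : Int) = pvCnt answers p := by
  simpa [pvCnt] using
    pv_foldl_count (fun i => p.getD (i % p.length) 0 == answers.getD i 0)
      (List.range answers.length) 0

-- the row the table-building loop produces for residue r, with the three looked-up values abstract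
def pvMkRow (v0 v1 v2 : Int) : PySem.Dict Int (List Int) :=
  let d0 : PySem.Dict Int (List Int) := PySem.Dict.empty
  let d1 := d0.insert v0 (d0.getD v0 [] ++ [0])
  let d2 := d1.insert v1 (d1.getD v1 [] ++ [1])
  d2.insert v2 (d2.getD v2 [] ++ [2])

def pvV0 (r : Nat) : Int := ([1, 2, 3, 4, 5] : List Int).getD (r % 5) 0
def pvV1 (r : Nat) : Int := ([2, 1, 2, 3, 2, 4, 2, 5] : List Int).getD (r % 8) 0
def pvV2 (r : Nat) : Int := ([3, 3, 1, 1, 2, 2, 4, 4, 5, 5] : List Int).getD (r % 10) 0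

set_option maxRecDepth 100000 in
theorem pv_table_entry (r : Nat) (hr : r < 40) :
    pvTable.getD r PySem.Dict.empty = pvMkRow (pvV0 r) (pvV1 r) (pvV2 r) := by
  have h : ∀ x ∈ List.range 40, pvTable.getD x PySem.Dict.empty = pvMkRow (pvV0 x) (pvV1 x) (pvV2 x) := by
    decide
  exact h r (List.mem_range.mpr hr)

set_option maxRecDepth 10000 in
theorem pv_mkRow_getD (v0 v1 v2 a : Int) :
    (pvMkRow v0 v1 v2).getD a [] =
      (if v0 == a then [(0 : Int)] else []) ++ (if v1 == a then [1] else [])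
        ++ (if v2 == a then [2] else []) := by
  unfold pvMkRow
  simp only [PySem.Dict.getD_insert, PySem.Dict.getD_empty, beq_iff_eq]
  split_ifs <;> subst_vars <;> simp_all

-- one step of B's answer-major pass on a triple of scores
theorem pv_step (x y z : Int) (r : Nat) (hr : r < 40) (a : Int) :
    ((pvTable.getD r PySem.Dict.empty).getD a []).foldl
        (fun (s : List Int) k => s.set k.toNat (s.getD k.toNat 0 + 1)) [x, y, z]
      = [x + (if pvV0 r == a then 1 else 0), y + (if pvV1 r == a then 1 else 0),
         z + (if pvV2 r == a then 1 else 0)] := by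
  rw [pv_table_entry r hr, pv_mkRow_getD]
  split_ifs <;> simp [List.foldl, List.getD]

-- running count of a pattern's matches from offset s
def pvC (p : List Int) : List Int → Nat → Int
  | [], _ => 0
  | a :: t, s => (if p.getD (s % p.length) 0 == a then 1 else 0) + pvC p t (s + 1)

theorem pv_pass (xs : List Int) : ∀ (s : Nat) (x y z : Int),
    (PySem.List.enumerate xs (s : Int)).foldl (fun st ia =>
        ((pvTable.getD (ia.1.toNat % 40) PySem.Dict.empty).getD ia.2 []).foldl
          (fun (s : List Int) k => s.set k.toNat (s.getD k.toNat 0 + 1)) st) [x, y, z]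
      = [x + pvC [1, 2, 3, 4, 5] xs s, y + pvC [2, 1, 2, 3, 2, 4, 2, 5] xs s,
         z + pvC [3, 3, 1, 1, 2, 2, 4, 4, 5, 5] xs s] := by
  induction xs with
  | nil => intro s x y z; simp [PySem.List.enumerate_nil, pvC]
  | cons a t ih =>
    intro s x y z
    rw [PySem.List.enumerate_cons, List.foldl_cons]
    have hcast : ((s : Int) + 1) = ((s + 1 : Nat) : Int) := by push_cast; ring
    have hn : (s : Int).toNat = s := Int.toNat_natCast s
    rw [hn, pv_step x y z (s % 40) (Nat.mod_lt s (by norm_num)) a, hcast, ih]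
    have h5 : s % 40 % 5 = s % 5 := Nat.mod_mod_of_dvd s (by norm_num)
    have h8 : s % 40 % 8 = s % 8 := Nat.mod_mod_of_dvd s (by norm_num)
    have h10 : s % 40 % 10 = s % 10 := Nat.mod_mod_of_dvd s (by norm_num)
    simp only [pvC, pvV0, pvV1, pvV2, List.length_cons, List.length_nil, h5, h8, h10]
    norm_num
    exact ⟨by ring, by ring, by ring⟩

theorem pvC_eq_filter (p : List Int) : ∀ (xs : List Int) (s : Nat),
    pvC p xs s = (((List.range xs.length).filter
      (fun i => p.getD ((s + i) % p.length) 0 == xs.getD i 0)).length : Int) := by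
  intro xs
  induction xs with
  | nil => intro s; simp [pvC]
  | cons a t ih =>
    intro s
    have hcomp : (fun i => p.getD ((s + i) % p.length) 0 == (a :: t).getD i 0) ∘ Nat.succ
        = fun i => p.getD ((s + 1 + i) % p.length) 0 == t.getD i 0 := by
      funext i
      have h : s + (i + 1) = s + 1 + i := by omega
      simp [Function.comp, Nat.succ_eq_add_one, h, List.getD]
    rw [pvC, List.length_cons, List.range_succ_eq_map, List.filter_cons, List.filter_map, hcomp]
    simp only [Nat.add_zero, List.getD_cons_zero, ih (s + 1)]
    split_ifs <;> simp <;> push_cast <;> omega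

theorem pvC_eq_cnt (p xs : List Int) : pvC p xs 0 = pvCnt xs p := by
  rw [pvC_eq_filter p xs 0, pvCnt]
  simp

-- ===== VERDICT (by name: the statement is the Claim_ definition above) =====
set_option maxRecDepth 100000 in
theorem solution_spec : Claim_equal_solution := by
  intro answers _
  unfold Spec_solution solution solution_alt
  have hp := pv_pass answers 0
  rw [Nat.cast_zero] at hp
  simp only [hp, List.foldl, pv_scoreA_eq, pvC_eq_cnt, zero_add]
  have h1 : (0:Int) ≤ pvCnt answers [1,2,3,4,5] := by unfold pvCnt; positivity
  generalize pvCnt answers [1,2,3,4,5] = s1 at h1 ⊢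
  generalize pvCnt answers [2,1,2,3,2,4,2,5] = s2
  generalize pvCnt answers [3,3,1,1,2,2,4,4,5,5] = s3
  rw [if_pos (by omega : (-1:Int) < s1)]
  simp only [PySem.List.max?_id_cons, List.foldl, Option.getD, PySem.List.enumerate_cons,
    PySem.List.enumerate_nil, List.filterMap_cons, List.filterMap_nil]
  simp only [beq_iff_eq]
  norm_num
  split_ifs <;> first | rfl | omega | (exfalso; simp only [Int.max_def] at *; split_ifs at * <;> omega)
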